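-- pv_equiv track=rewrite | github.com/bani4/python101 | CorrectBrackets.py | remove_neighbour
-- ===== SOURCE A (Python) =====
-- def remove_neighbour(sent):
--     sent=sent.replace("()", "")
--     a=sent.find('(')
--     b=sent.find(')')
--     if (b-a)==1 and (a!=-1 and b!=-1):
--         return remove_neighbour(sent)
--     else:
--         return sent
-- ===== SOURCE B (Python) =====
-- # Iterative re-implementation: explicit loop instead of tail recursion; the
-- # "()"-removal is a hand-written single pass and the stopping test a single
-- # scan for the first bracket character (instead of replace + two find calls).
-- def remove_neighbour(sent):
--     while True:
--         # one left-to-right non-overlapping removal pass (== sent.replace("()", ""))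
--         out = []
--         i = 0
--         n = len(sent)
--         while i < n:
--             if sent[i] == '(' and i + 1 < n and sent[i + 1] == ')':
--                 i += 2
--             else:
--                 out.append(sent[i])
--                 i += 1
--         sent = ''.join(out)
--         # find the first bracket character; continue only if it starts a "()"
--         j = 0
--         while j < len(sent) and sent[j] not in '()':
--             j += 1
--         if j + 1 < len(sent) and sent[j] == '(' and sent[j + 1] == ')':
--             continue
--         return sent
-- ===== Notes on version B (the rewrite author's own statement) =====
-- stated objective: alternative
-- what changed: Tail recursion becomes an explicit while-loop, the str.replace removal of adjacent bracket pairs becomes a hand-written single left-to-right removal pass, and the two find calls become one scan for the first bracket character with a direct adjacency test.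
import Mathlib
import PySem

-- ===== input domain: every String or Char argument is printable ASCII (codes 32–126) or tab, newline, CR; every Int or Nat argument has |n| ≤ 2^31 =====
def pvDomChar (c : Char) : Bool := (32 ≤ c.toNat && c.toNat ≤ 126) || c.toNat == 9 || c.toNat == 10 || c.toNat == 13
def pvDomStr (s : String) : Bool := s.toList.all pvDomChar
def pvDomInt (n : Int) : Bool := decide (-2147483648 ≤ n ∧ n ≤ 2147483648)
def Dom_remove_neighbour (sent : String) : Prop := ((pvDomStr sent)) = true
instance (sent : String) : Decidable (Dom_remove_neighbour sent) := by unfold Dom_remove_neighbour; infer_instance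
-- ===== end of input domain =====

-- B replaces the tail recursion by an explicit loop, the str.replace by a
-- hand-written single removal pass and the two find calls by one scan for the
-- first bracket character; objective: alternative decomposition (same cost).

-- ===== PORT A =====
-- (helper definition and lemmas below are cited by the ports' decreasing_by)

-- one left-to-right non-overlapping "()"-removal pass (B's helper; also the
-- normal form used here to reason about Python's str.replace("()", ""))
def stripPairs : List Char → List Char
  | '(' :: ')' :: t => stripPairs t
  | c :: t => c :: stripPairs t
  | [] => []

theorem isPrefixOf_pair_iff (c : Char) (t : List Char) :
    (['(', ')'] : List Char).isPrefixOf (c :: t) = true ↔ c = '(' ∧ ∃ t', t = ')' :: t' := by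
  cases t with
  | nil => simp [List.isPrefixOf]
  | cons c' t' =>
    simp only [List.isPrefixOf, Bool.and_eq_true, beq_iff_eq]
    constructor
    · rintro ⟨h1, h2, -⟩
      exact ⟨h1.symm, t', by rw [← h2]⟩
    · rintro ⟨h1, t'', ht⟩
      injection ht with ha hb
      exact ⟨h1.symm, ha.symm, by simp [List.isPrefixOf]⟩

theorem stripPairs_pair (t : List Char) : stripPairs ('(' :: ')' :: t) = stripPairs t := rfl

theorem stripPairs_cons_of_ne (c : Char) (t : List Char)
    (h : ¬ (['(', ')'] : List Char).isPrefixOf (c :: t) = true) :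
    stripPairs (c :: t) = c :: stripPairs t := by
  rw [stripPairs.eq_def]
  split
  · rename_i t' heq
    exfalso
    apply h
    rw [heq]
    simp [List.isPrefixOf]
  · rename_i c' t' heq
    injection heq with h1 h2
    rw [h1, h2]
  · rename_i heq
    simp at heq

theorem replace_go_eq : ∀ (fuel : Nat) (l acc : List Char), l.length ≤ fuel →
    PySem.Chars.replace.go ['(', ')'] [] fuel l acc = acc.reverse ++ stripPairs l := by
  intro fuel
  induction fuel with
  | zero =>
    intro l acc h
    have : l = [] := List.length_eq_zero_iff.mp (Nat.le_zero.mp h)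
    subst this
    simp [PySem.Chars.replace.go, stripPairs]
  | succ n ih =>
    intro l acc h
    cases l with
    | nil => simp [PySem.Chars.replace.go, stripPairs]
    | cons c t =>
      by_cases hp : (['(', ')'] : List Char).isPrefixOf (c :: t) = true
      · obtain ⟨hc, t', ht⟩ := (isPrefixOf_pair_iff c t).mp hp
        subst hc; subst ht
        simp only [PySem.Chars.replace.go, hp, if_pos]
        have hdrop : List.drop (['(', ')'] : List Char).length ('(' :: ')' :: t') = t' := rfl
        rw [hdrop]
        simp only [List.reverse_nil, List.nil_append]
        rw [ih t' acc (by simp at h ⊢; omega), stripPairs_pair]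
      · simp only [PySem.Chars.replace.go]
        rw [if_neg (by simp [hp]), ih t (c :: acc) (by simp at h ⊢; omega)]
        rw [stripPairs_cons_of_ne c t hp]
        simp

theorem replace_eq_strip (l : List Char) :
    PySem.Chars.replace l ['(', ')'] [] = stripPairs l := by
  rw [PySem.Chars.replace]
  rw [if_neg (by simp)]
  simpa using replace_go_eq l.length l [] le_rfl

theorem stripPairs_length_le (l : List Char) : (stripPairs l).length ≤ l.length := by
  induction l using stripPairs.induct with
  | case1 t ih => rw [stripPairs_pair]; simp; omega
  | case2 c t hne ih =>
    have hnp : ¬ (['(', ')'] : List Char).isPrefixOf (c :: t) = true := by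
      intro hp
      obtain ⟨hc, t', ht⟩ := (isPrefixOf_pair_iff c t).mp hp
      exact hne t' hc ht
    rw [stripPairs_cons_of_ne c t hnp]
    simpa using ih
  | case3 => simp [stripPairs]

theorem stripPairs_eq_of_not_infix (l : List Char) (h : ¬ ['(', ')'] <:+: l) :
    stripPairs l = l := by
  induction l using stripPairs.induct with
  | case1 t ih => exact absurd ⟨[], t, rfl⟩ h
  | case2 c t hne ih =>
    have hnp : ¬ (['(', ')'] : List Char).isPrefixOf (c :: t) = true := by
      intro hp
      obtain ⟨hc, t', ht⟩ := (isPrefixOf_pair_iff c t).mp hp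
      exact hne t' hc ht
    have ht : ¬ ['(', ')'] <:+: t := fun hi => h (List.infix_cons hi)
    rw [stripPairs_cons_of_ne c t hnp, ih ht]
  | case3 => rfl

theorem stripPairs_length_lt (l : List Char) (h : ['(', ')'] <:+: l) :
    (stripPairs l).length < l.length := by
  induction l using stripPairs.induct with
  | case1 t ih =>
    have := stripPairs_length_le t
    rw [stripPairs_pair]
    simp
    omega
  | case2 c t hne ih =>
    have hnp : ¬ (['(', ')'] : List Char).isPrefixOf (c :: t) = true := by
      intro hp
      obtain ⟨hc, t', ht⟩ := (isPrefixOf_pair_iff c t).mp hp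
      exact hne t' hc ht
    have ht : ['(', ')'] <:+: t := by
      rcases List.infix_cons_iff.mp h with hp | hi
      · exfalso
        apply hnp
        obtain ⟨u, hu⟩ := hp
        rw [← hu]
        simp [List.isPrefixOf]
      · exact hi
    rw [stripPairs_cons_of_ne c t hnp]
    simpa using ih ht
  | case3 => simp at h

-- A's continuation test implies the post-replace string still contains "()"
theorem cond_infix (s : List Char)
    (h1 : PySem.Chars.find s [')'] - PySem.Chars.find s ['('] = 1)
    (h2 : PySem.Chars.find s ['('] ≠ -1) :
    ['(', ')'] <:+: s := by
  have ha0 : (0 : Int) ≤ PySem.Chars.find s ['('] := by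
    have := PySem.Chars.neg_one_le_find s ['(']
    omega
  obtain ⟨hpa, -⟩ := PySem.Chars.find_spec (s := s) (sub := ['(']) ha0
  have hb0 : (0 : Int) ≤ PySem.Chars.find s [')'] := by omega
  obtain ⟨hpb, -⟩ := PySem.Chars.find_spec (s := s) (sub := [')']) hb0
  set a : Nat := (PySem.Chars.find s ['(']).toNat with hadef
  have hbt : (PySem.Chars.find s [')']).toNat = a + 1 := by
    have : PySem.Chars.find s [')'] = PySem.Chars.find s ['('] + 1 := by omega
    rw [this]
    omega
  rw [hbt] at hpb
  obtain ⟨u, hu⟩ := hpa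
  obtain ⟨v, hv⟩ := hpb
  have hdd : s.drop (a + 1) = u := by
    have hstep : s.drop (a + 1) = (s.drop a).drop 1 := by
      rw [List.drop_drop]
    rw [hstep, ← hu]
    rfl
  rw [hdd] at hv
  refine ⟨s.take a, v, ?_⟩
  have hta : s.take a ++ s.drop a = s := List.take_append_drop a s
  conv_rhs => rw [← hta, ← hu, ← hv]
  simp

def remove_neighbour (sent : String) : String :=
  let s := PySem.Str.replace sent "()" ""
  let a := PySem.Str.find s "("
  let b := PySem.Str.find s ")"
  if h : b - a = 1 ∧ (a ≠ -1 ∧ b ≠ -1) then remove_neighbour s else s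
termination_by sent.toList.length
decreasing_by
  simp only [s, a, b, PySem.Str.find_eq, PySem.Str.toList_replace] at h ⊢
  have h2 : ("()" : String).toList = ['(', ')'] := by decide
  have h3 : ("(" : String).toList = ['('] := by decide
  have h4 : (")" : String).toList = [')'] := by decide
  have h5 : ("" : String).toList = [] := by decide
  simp only [h2, h3, h4, h5] at h ⊢
  rw [replace_eq_strip] at h ⊢
  have hinf : ['(', ')'] <:+: stripPairs sent.toList := cond_infix _ h.1 h.2.1
  by_cases hl : ['(', ')'] <:+: sent.toList
  · exact stripPairs_length_lt _ hl
  · rw [stripPairs_eq_of_not_infix _ hl] at hinf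
    exact absurd hinf hl

-- ===== PORT B =====
-- scan to the first bracket character; true iff it is '(' followed by ')'
def contCheck : List Char → Bool
  | [] => false
  | '(' :: t => decide (t.head? = some ')')
  | ')' :: _ => false
  | _ :: t => contCheck t

theorem contCheck_cons_of_ne (c : Char) (t : List Char) (h1 : c ≠ '(') (h2 : c ≠ ')') :
    contCheck (c :: t) = contCheck t := by
  rw [contCheck.eq_def]
  split
  · rename_i heq; simp at heq
  · rename_i heq; injection heq with hc _; exact absurd hc h1
  · rename_i heq; injection heq with hc _; exact absurd hc h2
  · rename_i heq; injection heq with _ ht; rw [ht]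

theorem contCheck_infix (l : List Char) (h : contCheck l = true) : ['(', ')'] <:+: l := by
  induction l using contCheck.induct with
  | case1 => simp [contCheck] at h
  | case2 t =>
    simp only [contCheck, decide_eq_true_eq] at h
    cases t with
    | nil => simp at h
    | cons c' t' =>
      simp at h
      exact ⟨[], t', by simp [h]⟩
  | case3 t => simp [contCheck] at h
  | case4 c t h1 h2 ih =>
    rw [contCheck_cons_of_ne c t (fun hh => h1 hh) (fun hh => h2 hh)] at h
    exact List.infix_cons (ih h)

-- the loop of B: strip once, test, repeat
def removeNeighbourB (l : List Char) : List Char :=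
  let s := stripPairs l
  if h : contCheck s = true then removeNeighbourB s else s
termination_by l.length
decreasing_by
  simp only [s] at h ⊢
  have hinf : ['(', ')'] <:+: stripPairs l := contCheck_infix _ h
  by_cases hl : ['(', ')'] <:+: l
  · exact stripPairs_length_lt _ hl
  · rw [stripPairs_eq_of_not_infix _ hl] at hinf
    exact absurd hinf hl

def remove_neighbour_alt (sent : String) : String :=
  String.ofList (removeNeighbourB sent.toList)

-- ===== PRECONDITION & SPEC =====
def Spec_remove_neighbour (sent : String) (out : String) : Prop := out = remove_neighbour_alt sent
instance (sent : String) (out : String) : Decidable (Spec_remove_neighbour sent out) := by unfold Spec_remove_neighbour; infer_instance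

-- ===== CLAIM (what is proved, stated in full; the proofs are below) =====
def Claim_equal_remove_neighbour : Prop := ∀ (sent : String), Dom_remove_neighbour sent → Spec_remove_neighbour sent (remove_neighbour sent)

-- ===== LEMMAS AND PROOFS =====

theorem find_go_shift (sub : List Char) (hsub : sub ≠ []) :
    ∀ (l : List Char) (k : Nat), PySem.Chars.find.go sub l k =
      if PySem.Chars.find l sub = -1 then -1 else k + PySem.Chars.find l sub := by
  intro l
  induction l with
  | nil =>
    intro k
    simp [PySem.Chars.find, PySem.Chars.find.go, hsub]
  | cons c t ih =>
    intro k
    rw [PySem.Chars.find.go]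
    by_cases hp : sub.isPrefixOf (c :: t) = true
    · rw [if_pos hp]
      have h0 : PySem.Chars.find (c :: t) sub = 0 := by
        rw [PySem.Chars.find, PySem.Chars.find.go, if_pos hp]
        norm_num
      rw [h0]
      simp
    · rw [if_neg hp, ih]
      have hstep : PySem.Chars.find (c :: t) sub =
          if PySem.Chars.find t sub = -1 then -1 else 1 + PySem.Chars.find t sub := by
        rw [PySem.Chars.find, PySem.Chars.find.go, if_neg hp, ih 1]
        norm_num
      rw [hstep]
      by_cases hf : PySem.Chars.find t sub = -1
      · simp [hf]
      · simp [hf]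
        have g := PySem.Chars.neg_one_le_find t sub
        rw [if_neg (by omega)]
        ring

theorem find_cons (c d : Char) (t : List Char) :
    PySem.Chars.find (c :: t) [d] =
      if c = d then 0
      else if PySem.Chars.find t [d] = -1 then -1 else 1 + PySem.Chars.find t [d] := by
  rw [PySem.Chars.find, PySem.Chars.find.go]
  by_cases hc : c = d
  · have hp : ([d] : List Char).isPrefixOf (c :: t) = true := by simp [List.isPrefixOf, hc]
    rw [if_pos hp, if_pos hc]
    norm_num
  · have hp : ¬ ([d] : List Char).isPrefixOf (c :: t) = true := by
      simp [List.isPrefixOf]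
      exact fun hh => hc hh.symm
    rw [if_neg hp, if_neg hc, find_go_shift [d] (by simp) t 1]
    norm_num

-- A's continuation condition is exactly B's contCheck
theorem cond_iff_contCheck (s : List Char) :
    (PySem.Chars.find s [')'] - PySem.Chars.find s ['('] = 1 ∧
      (PySem.Chars.find s ['('] ≠ -1 ∧ PySem.Chars.find s [')'] ≠ -1)) ↔ contCheck s = true := by
  induction s using contCheck.induct with
  | case1 =>
    simp [PySem.Chars.find, PySem.Chars.find.go, contCheck]
  | case2 t =>
    have ha : PySem.Chars.find ('(' :: t) ['('] = 0 := by rw [find_cons]; simp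
    have hb : PySem.Chars.find ('(' :: t) [')'] =
        if PySem.Chars.find t [')'] = -1 then -1 else 1 + PySem.Chars.find t [')'] := by
      rw [find_cons]; simp
    simp only [contCheck, ha, hb, decide_eq_true_eq]
    constructor
    · rintro ⟨h1, -, h3⟩
      split at h1
      · omega
      · have h0 : PySem.Chars.find t [')'] = 0 := by omega
        cases t with
        | nil => simp [PySem.Chars.find, PySem.Chars.find.go] at h0
        | cons c' t' =>
          rw [find_cons] at h0
          split at h0
          · rename_i hc; simp [hc]
          · have := PySem.Chars.neg_one_le_find t' [')']
            split at h0 <;> omega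
    · intro h
      cases t with
      | nil => simp at h
      | cons c' t' =>
        simp at h
        have h0 : PySem.Chars.find (c' :: t') [')'] = 0 := by rw [find_cons]; simp [h]
        rw [h0]
        norm_num
  | case3 t =>
    have hb : PySem.Chars.find (')' :: t) [')'] = 0 := by rw [find_cons]; simp
    have ha : PySem.Chars.find (')' :: t) ['('] =
        if PySem.Chars.find t ['('] = -1 then -1 else 1 + PySem.Chars.find t ['('] := by
      rw [find_cons]; simp
    rw [hb, ha]
    simp only [contCheck, Bool.false_eq_true, iff_false]
    rintro ⟨h1, h2, -⟩
    have := PySem.Chars.neg_one_le_find t ['(']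
    split at h1
    · simp_all
    · omega
  | case4 c t h1 h2 ih =>
    have hne1 : c ≠ '(' := fun hh => h1 hh
    have hne2 : c ≠ ')' := fun hh => h2 hh
    have ha : PySem.Chars.find (c :: t) ['('] =
        if PySem.Chars.find t ['('] = -1 then -1 else 1 + PySem.Chars.find t ['('] := by
      rw [find_cons, if_neg hne1]
    have hb : PySem.Chars.find (c :: t) [')'] =
        if PySem.Chars.find t [')'] = -1 then -1 else 1 + PySem.Chars.find t [')'] := by
      rw [find_cons, if_neg hne2]
    rw [ha, hb, contCheck_cons_of_ne c t hne1 hne2, ← ih]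
    have g1 := PySem.Chars.neg_one_le_find t ['(']
    have g2 := PySem.Chars.neg_one_le_find t [')']
    split <;> split <;> constructor <;> rintro ⟨x1, x2, x3⟩ <;>
      exact ⟨by omega, by omega, by omega⟩

-- one step of A equals one step of B, lifted over the whole recursion
theorem main_eq : ∀ (n : Nat) (s : String), s.toList.length ≤ n →
    remove_neighbour s = String.ofList (removeNeighbourB s.toList) := by
  intro n
  induction n with
  | zero =>
    intro s hs
    have hnil : s.toList = [] := List.length_eq_zero_iff.mp (Nat.le_zero.mp hs)
    rw [remove_neighbour, removeNeighbourB]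
    have h2 : ("()" : String).toList = ['(', ')'] := by decide
    have h5 : ("" : String).toList = [] := by decide
    have hrep : (PySem.Str.replace s "()" "").toList = stripPairs s.toList := by
      rw [PySem.Str.toList_replace, h2, h5, replace_eq_strip]
    rw [hnil] at hrep
    have hcond : ¬ (PySem.Str.find (PySem.Str.replace s "()" "") ")" -
        PySem.Str.find (PySem.Str.replace s "()" "") "(" = 1 ∧
        (PySem.Str.find (PySem.Str.replace s "()" "") "(" ≠ -1 ∧
         PySem.Str.find (PySem.Str.replace s "()" "") ")" ≠ -1)) := by
      simp only [PySem.Str.find_eq, hrep]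
      intro hc
      have h3 : ("(" : String).toList = ['('] := by decide
      have h4 : (")" : String).toList = [')'] := by decide
      rw [h3, h4] at hc
      have := (cond_iff_contCheck []).mp (by simpa [stripPairs] using hc)
      simp [contCheck] at this
    rw [dif_neg hcond, hnil]
    rw [dif_neg (by simp [stripPairs, contCheck])]
    apply String.ext
    simp [hrep]
  | succ n ih =>
    intro s hs
    rw [remove_neighbour, removeNeighbourB]
    have h2 : ("()" : String).toList = ['(', ')'] := by decide
    have h5 : ("" : String).toList = [] := by decide
    have hrep : (PySem.Str.replace s "()" "").toList = stripPairs s.toList := by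
      rw [PySem.Str.toList_replace, h2, h5, replace_eq_strip]
    have hcond : (PySem.Str.find (PySem.Str.replace s "()" "") ")" -
        PySem.Str.find (PySem.Str.replace s "()" "") "(" = 1 ∧
        (PySem.Str.find (PySem.Str.replace s "()" "") "(" ≠ -1 ∧
         PySem.Str.find (PySem.Str.replace s "()" "") ")" ≠ -1)) ↔
        contCheck (stripPairs s.toList) = true := by
      simp only [PySem.Str.find_eq, hrep]
      have h3 : ("(" : String).toList = ['('] := by decide
      have h4 : (")" : String).toList = [')'] := by decide
      rw [h3, h4]
      exact cond_iff_contCheck _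
    by_cases hc : contCheck (stripPairs s.toList) = true
    · rw [dif_pos (hcond.mpr hc), dif_pos hc]
      have hlt : (PySem.Str.replace s "()" "").toList.length ≤ n := by
        rw [hrep]
        have hinf : ['(', ')'] <:+: stripPairs s.toList := contCheck_infix _ hc
        by_cases hl : ['(', ')'] <:+: s.toList
        · have := stripPairs_length_lt _ hl
          omega
        · rw [stripPairs_eq_of_not_infix _ hl] at hinf
          exact absurd hinf hl
      rw [ih _ hlt, hrep]
    · rw [dif_neg (fun hh => hc (hcond.mp hh)), dif_neg hc]
      apply String.ext
      simp [hrep]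

-- ===== VERDICT (by name: the statement is the Claim_ definition above) =====
theorem remove_neighbour_spec : Claim_equal_remove_neighbour := by
  intro sent _
  unfold Spec_remove_neighbour remove_neighbour_alt
  exact main_eq sent.toList.length sent le_rfl
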